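-- pv_equiv track=rewrite | github.com/dirvine/wordlist | enhanced_generator.py | filter_homophones
-- ===== SOURCE A (Python) =====
-- from typing import List, Set, Tuple
--
-- def filter_homophones(word: str, existing_words: Set[str]) -> bool:
--     """Filter out common homophones."""
--     # Common homophone pairs to avoid
--     homophone_pairs = [
--         ('to', 'too', 'two'), ('there', 'their', 'they\'re'),
--         ('your', 'you\'re'), ('its', 'it\'s'), ('whose', 'who\'s'),
--         ('accept', 'except'), ('affect', 'effect'), ('than', 'then'),
--         ('lose', 'loose'), ('choose', 'chose'), ('advice', 'advise'),
--         ('break', 'brake'), ('coarse', 'course'), ('fair', 'fare'),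
--         ('hear', 'here'), ('hole', 'whole'), ('knew', 'new'),
--         ('know', 'no'), ('made', 'maid'), ('mail', 'male'),
--         ('meat', 'meet'), ('pair', 'pear'), ('peace', 'piece'),
--         ('plain', 'plane'), ('principal', 'principle'), ('rain', 'reign'),
--         ('right', 'write'), ('role', 'roll'), ('sail', 'sale'),
--         ('scene', 'seen'), ('sea', 'see'), ('some', 'sum'),
--         ('son', 'sun'), ('steal', 'steel'), ('tail', 'tale'),
--         ('wait', 'weight'), ('waste', 'waist'), ('weak', 'week'),
--         ('weather', 'whether'), ('where', 'wear'), ('which', 'witch'),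
--     ]
--
--     # If this word is part of a homophone group and another is already in set
--     for group in homophone_pairs:
--         if word in group:
--             for other in group:
--                 if other != word and other in existing_words:
--                     return False
--
--     return True
-- ===== SOURCE B (Python) =====
-- # B: the homophone groups are stored as one compact encoded string, parsed once into a
-- # word -> partner-set index; the function body is a single lookup plus one disjointness test.
--
-- _TABLE = ("to too two|there their they're|your you're|its it's|whose who's|"
--           "accept except|affect effect|than then|lose loose|choose chose|"
--           "advice advise|break brake|coarse course|fair fare|hear here|"
--           "hole whole|knew new|know no|made maid|mail male|meat meet|"
--           "pair pear|peace piece|plain plane|principal principle|rain reign|"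
--           "right write|role roll|sail sale|scene seen|sea see|some sum|"
--           "son sun|steal steel|tail tale|wait weight|waste waist|weak week|"
--           "weather whether|where wear|which witch")
--
-- _PARTNERS = {}
-- for _grp in _TABLE.split('|'):
--     _ws = _grp.split(' ')
--     for _w in _ws:
--         _PARTNERS[_w] = _PARTNERS.get(_w, set()) | {o for o in _ws if o != _w}
--
--
-- def filter_homophones(word, existing_words):
--     """Filter out common homophones."""
--     return _PARTNERS.get(word, set()).isdisjoint(existing_words)
-- ===== Notes on version B (the rewrite author's own statement) =====
-- stated objective: simpler
-- what changed: Stores the homophone groups as one compact encoded string parsed once at module load into a dict mapping each word to the set of its homophone partners, so the function body is a single dict lookup plus one set-disjointness test instead of A's nested scan of the pairs table with an early return.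
import Mathlib
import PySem

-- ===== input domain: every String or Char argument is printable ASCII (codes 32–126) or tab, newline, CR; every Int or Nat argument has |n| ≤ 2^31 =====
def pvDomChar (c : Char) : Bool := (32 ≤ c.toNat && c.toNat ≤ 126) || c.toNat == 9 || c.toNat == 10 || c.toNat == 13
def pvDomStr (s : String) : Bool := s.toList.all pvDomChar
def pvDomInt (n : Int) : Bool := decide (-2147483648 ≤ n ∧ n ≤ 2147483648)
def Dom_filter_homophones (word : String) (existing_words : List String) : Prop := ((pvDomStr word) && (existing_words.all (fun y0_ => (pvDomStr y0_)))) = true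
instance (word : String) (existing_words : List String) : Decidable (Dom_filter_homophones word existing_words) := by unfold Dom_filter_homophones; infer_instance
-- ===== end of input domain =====

-- ===== PORT A =====
-- B stores the homophone groups in one compact encoded string parsed once into a word -> partner-set
-- index; the function body is a single dict lookup plus one set-disjointness test (simpler call body).

-- A's constant homophone_pairs table (tuples of strings -> lists of strings)
def homophonePairs : List (List String) := [
    ["to", "too", "two"],
    ["there", "their", "they're"],
    ["your", "you're"],
    ["its", "it's"],
    ["whose", "who's"],
    ["accept", "except"],
    ["affect", "effect"],
    ["than", "then"],
    ["lose", "loose"],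
    ["choose", "chose"],
    ["advice", "advise"],
    ["break", "brake"],
    ["coarse", "course"],
    ["fair", "fare"],
    ["hear", "here"],
    ["hole", "whole"],
    ["knew", "new"],
    ["know", "no"],
    ["made", "maid"],
    ["mail", "male"],
    ["meat", "meet"],
    ["pair", "pear"],
    ["peace", "piece"],
    ["plain", "plane"],
    ["principal", "principle"],
    ["rain", "reign"],
    ["right", "write"],
    ["role", "roll"],
    ["sail", "sale"],
    ["scene", "seen"],
    ["sea", "see"],
    ["some", "sum"],
    ["son", "sun"],
    ["steal", "steel"],
    ["tail", "tale"],
    ["wait", "weight"],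
    ["waste", "waist"],
    ["weak", "week"],
    ["weather", "whether"],
    ["where", "wear"],
    ["which", "witch"]
]

-- A's outer loop: 'for group in homophone_pairs: if word in group: for other in group:
--   if other != word and other in existing_words: return False'; final 'return True'.
def aScan (word : String) (existing_words : List String) : List (List String) → Bool
  | [] => true
  | g :: rest =>
    if g.contains word then
      if g.any (fun other => other != word && existing_words.contains other) then false
      else aScan word existing_words rest
    else aScan word existing_words rest

def filter_homophones (word : String) (existing_words : List String) : Bool :=
  aScan word existing_words homophonePairs

-- ===== PORT B =====
-- s.split(sep) for a non-empty separator, via PySem.Chars.splitOn (exact for sep != '')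
def strSplit (s sep : String) : List String :=
  (PySem.Chars.splitOn s.toList sep.toList).map String.ofList

-- _TABLE: one compact encoded string ('|' between groups, ' ' between the words of a group)
def homophoneTable : String :=
  "to too two|there their they're|your you're|its it's|whose who's|accept except|affect effect|than then|lose loose|choose chose|advice advise|break brake|coarse course|fair fare|hear here|hole whole|knew new|know no|made maid|mail male|meat meet|pair pear|peace piece|plain plane|principal principle|rain reign|right write|role roll|sail sale|scene seen|sea see|some sum|son sun|steal steel|tail tale|wait weight|waste waist|weak week|weather whether|where wear|which witch"

-- _PARTNERS[_w] = _PARTNERS.get(_w, set()) | {o for o in _ws if o != _w}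
def partnersStep (ws : List String) (d : PySem.Dict String (PySem.Set String)) (w : String) :
    PySem.Dict String (PySem.Set String) :=
  d.insert w (PySem.Set.union (d.getD w PySem.Set.empty)
    (PySem.Set.ofList (ws.filter (fun o => o != w))))

-- for _grp in _TABLE.split('|'): _ws = _grp.split(' '); for _w in _ws: …
def partnersIndex : PySem.Dict String (PySem.Set String) :=
  (strSplit homophoneTable "|").foldl
    (fun d grp =>
      let ws := strSplit grp " "
      ws.foldl (partnersStep ws) d)
    PySem.Dict.empty

-- return _PARTNERS.get(word, set()).isdisjoint(existing_words)
def filter_homophones_alt (word : String) (existing_words : List String) : Bool :=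
  PySem.Set.isdisjoint (partnersIndex.getD word PySem.Set.empty) existing_words

-- ===== PRECONDITION & SPEC =====
def Spec_filter_homophones (word : String) (existing_words : List String) (out : Bool) : Prop := out = filter_homophones_alt word existing_words
instance (word : String) (existing_words : List String) (out : Bool) : Decidable (Spec_filter_homophones word existing_words out) := by unfold Spec_filter_homophones; infer_instance

-- ===== CLAIM (what is proved, stated in full; the proofs are below) =====
def Claim_equal_filter_homophones : Prop := ∀ (word : String) (existing_words : List String), Dom_filter_homophones word existing_words → Spec_filter_homophones word existing_words (filter_homophones word existing_words)

-- ===== LEMMAS AND PROOFS =====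

-- B's parse of the encoded table yields exactly A's group list
set_option maxRecDepth 40000 in
set_option maxHeartbeats 4000000 in
theorem parse_table_eq :
    (strSplit homophoneTable "|").map (fun grp => strSplit grp " ") =
      homophonePairs := by decide

-- membership in the partner set accumulated by one group's inner loop
theorem getD_groupFold_mem (g : List String) (word p : String) :
    ∀ (l : List String) (d : PySem.Dict String (PySem.Set String)),
      p ∈ (l.foldl (partnersStep g) d).getD word PySem.Set.empty ↔
        p ∈ d.getD word PySem.Set.empty ∨ (word ∈ l ∧ p ∈ g ∧ p ≠ word) := by
  intro l
  induction l with
  | nil => simp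
  | cons w rest ih =>
    intro d
    simp only [List.foldl_cons, ih, partnersStep]
    rw [PySem.Dict.getD_insert]
    by_cases h : word = w
    · subst h
      simp [PySem.Set.mem_union, PySem.Set.mem_ofList, List.mem_filter]
      tauto
    · simp only [if_neg h, List.mem_cons]
      tauto

-- membership in the partner set after the whole table has been indexed
theorem getD_tableFold_mem (word p : String) :
    ∀ (tbl : List (List String)) (d : PySem.Dict String (PySem.Set String)),
      p ∈ (tbl.foldl (fun d g => g.foldl (partnersStep g) d) d).getD word PySem.Set.empty ↔
        p ∈ d.getD word PySem.Set.empty ∨ ∃ g ∈ tbl, word ∈ g ∧ p ∈ g ∧ p ≠ word := by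
  intro tbl
  induction tbl with
  | nil => simp
  | cons g rest ih =>
    intro d
    simp only [List.foldl_cons, ih, getD_groupFold_mem, List.mem_cons]
    constructor
    · rintro ((h | h) | ⟨g', hg', h⟩)
      · exact Or.inl h
      · exact Or.inr ⟨g, Or.inl rfl, h⟩
      · exact Or.inr ⟨g', Or.inr hg', h⟩
    · rintro (h | ⟨g', (rfl | hg'), h⟩)
      · exact Or.inl (Or.inl h)
      · exact Or.inl (Or.inr h)
      · exact Or.inr ⟨g', hg', h⟩

-- partnersIndex, rewritten as the fold over A's group list (via parse_table_eq)
theorem partnersIndex_eq :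
    partnersIndex =
      homophonePairs.foldl (fun d g => g.foldl (partnersStep g) d) PySem.Dict.empty := by
  rw [partnersIndex, ← parse_table_eq, List.foldl_map]

-- characterisation of A's nested scan
theorem aScan_eq_true_iff (word : String) (existing_words : List String) :
    ∀ (tbl : List (List String)),
      aScan word existing_words tbl = true ↔
        ∀ g ∈ tbl, word ∈ g → ∀ o ∈ g, o ≠ word → o ∉ existing_words := by
  intro tbl
  induction tbl with
  | nil => simp [aScan]
  | cons g rest ih =>
    simp only [aScan, List.mem_cons]
    by_cases hw : g.contains word
    · rw [if_pos hw]
      rw [List.contains_eq_mem, decide_eq_true_eq] at hw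
      by_cases hbad : g.any (fun other => other != word && existing_words.contains other)
      · rw [if_pos hbad]
        rw [List.any_eq_true] at hbad
        obtain ⟨o, ho, hcond⟩ := hbad
        rw [Bool.and_eq_true, bne_iff_ne, List.contains_eq_mem, decide_eq_true_eq] at hcond
        constructor
        · exact fun hf => (Bool.false_ne_true hf).elim
        · exact fun h => absurd hcond.2 (h g (Or.inl rfl) hw o ho hcond.1)
      · rw [if_neg hbad, ih]
        rw [List.any_eq_true] at hbad
        push Not at hbad
        constructor
        · rintro h g' (rfl | hg')
          · intro _ o ho hne hmem
            exact hbad o ho (by simp [hne, List.contains_eq_mem, hmem])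
          · exact h g' hg'
        · exact fun h g' hg' => h g' (Or.inr hg')
    · rw [if_neg hw, ih]
      rw [List.contains_eq_mem, decide_eq_true_eq] at hw
      constructor
      · rintro h g' (rfl | hg')
        · exact fun hmem => absurd hmem hw
        · exact h g' hg'
      · exact fun h g' hg' => h g' (Or.inr hg')

-- ===== VERDICT (by name: the statement is the Claim_ definition above) =====
set_option maxRecDepth 8192 in
set_option maxHeartbeats 1000000 in
theorem filter_homophones_spec : Claim_equal_filter_homophones := by
  intro word existing_words _dom
  unfold Spec_filter_homophones
  rw [Bool.eq_iff_iff]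
  rw [filter_homophones, filter_homophones_alt, aScan_eq_true_iff,
    PySem.Set.isdisjoint_iff, partnersIndex_eq]
  constructor
  · intro h p hp
    rw [getD_tableFold_mem] at hp
    rcases hp with hp | ⟨g, hg, hw, hpg, hne⟩
    · simp [PySem.Dict.getD_empty] at hp
    · exact h g hg hw p hpg hne
  · intro h g hg hw o ho hne
    exact h o ((getD_tableFold_mem word o _ _).mpr (Or.inr ⟨g, hg, hw, ho, hne⟩))
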